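-- pv_equiv track=rewrite | github.com/GCaptainNemo/pdf2docx | src/img2str2.py | row_deltay2par
-- ===== SOURCE A (Python) =====
-- def row_deltay2par(row_content_lst, delta_y_lst, delta_x_lst):
--     par_lst = []
--     par_str = ""
--     for i in range(len(row_content_lst)):
--         if i == 0:
--             par_str += row_content_lst[i]
--         elif delta_y_lst[i - 1] < 14 and delta_x_lst[i] < 10:
--             # 行之间距离小于14，距离末尾距离小于10，则认为是一段
--             par_str += row_content_lst[i]
--         else:
--             # par_lst.append(int(delta_y_lst[i - 1] / 10) * "\n" + par_str)
--             # par_lst.append(par_str + int(delta_y_lst[i - 1] / 10) * "\n")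
--             par_lst.append(par_str)
--
--             par_str = row_content_lst[i]
--     par_lst.append(par_str)
--     return par_lst
-- ===== SOURCE B (Python) =====
-- def row_deltay2par(row_content_lst, delta_y_lst, delta_x_lst):
--     n = len(row_content_lst)
--     bounds = [0]
--     for i in range(1, n):
--         if not (delta_y_lst[i - 1] < 14 and delta_x_lst[i] < 10):
--             bounds.append(i)
--     bounds.append(n)
--     return ["".join(row_content_lst[a:b]) for a, b in zip(bounds, bounds[1:])]
-- ===== Notes on version B (the rewrite author's own statement) =====
-- stated objective: alternative
-- what changed: Instead of accumulating a running paragraph string in one stateful loop, B first computes the list of paragraph boundary indices and then joins the corresponding slices of row_content_lst.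
import Mathlib
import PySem

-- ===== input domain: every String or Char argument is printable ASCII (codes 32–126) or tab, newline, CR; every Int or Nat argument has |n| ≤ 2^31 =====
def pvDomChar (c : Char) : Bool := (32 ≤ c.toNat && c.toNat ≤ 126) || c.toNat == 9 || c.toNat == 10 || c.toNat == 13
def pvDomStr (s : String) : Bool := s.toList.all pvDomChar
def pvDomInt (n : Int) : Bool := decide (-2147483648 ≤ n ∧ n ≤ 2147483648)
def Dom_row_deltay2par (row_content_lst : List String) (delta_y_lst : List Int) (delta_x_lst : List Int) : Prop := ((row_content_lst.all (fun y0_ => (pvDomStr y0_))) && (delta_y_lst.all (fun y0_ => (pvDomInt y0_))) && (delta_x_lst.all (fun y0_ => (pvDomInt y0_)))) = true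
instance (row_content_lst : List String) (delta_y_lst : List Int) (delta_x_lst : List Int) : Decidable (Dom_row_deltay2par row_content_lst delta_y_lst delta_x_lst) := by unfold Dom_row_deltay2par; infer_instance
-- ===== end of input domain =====

-- B replaces A's single stateful accumulator loop by computing the paragraph boundary indices
-- first and then joining the corresponding slices (objective: alternative, no speed claim).

-- ===== PORT A =====
-- literal transliteration of A: one fold over range(len(rows)) carrying (par_lst, par_str)
def row_deltay2par (row_content_lst : List String) (delta_y_lst : List Int) (delta_x_lst : List Int) : List String :=
  let res := (PySem.List.pyRange 0 (row_content_lst.length : Int) 1).foldl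
    (fun (st : List String × String) (i : Int) =>
      if i == 0 then
        (st.1, st.2 ++ PySem.List.pyGetD row_content_lst i "")
      else if PySem.List.pyGetD delta_y_lst (i - 1) 0 < 14 ∧ PySem.List.pyGetD delta_x_lst i 0 < 10 then
        (st.1, st.2 ++ PySem.List.pyGetD row_content_lst i "")
      else
        (st.1 ++ [st.2], PySem.List.pyGetD row_content_lst i ""))
    ([], "")
  res.1 ++ [res.2]

-- ===== PORT B =====
-- literal transliteration of B: boundary indices, then join each slice
def row_deltay2par_alt (row_content_lst : List String) (delta_y_lst : List Int) (delta_x_lst : List Int) : List String :=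
  let n : Int := row_content_lst.length
  let bounds := (PySem.List.pyRange 1 n 1).foldl
    (fun (bs : List Int) (i : Int) =>
      if ¬ (PySem.List.pyGetD delta_y_lst (i - 1) 0 < 14 ∧ PySem.List.pyGetD delta_x_lst i 0 < 10) then
        bs ++ [i]
      else bs)
    [0]
  let bounds2 := bounds ++ [n]
  (bounds2.zip bounds2.tail).map
    (fun ab => PySem.Str.join "" (PySem.List.slice row_content_lst (some ab.1) (some ab.2)))

-- ===== PRECONDITION & SPEC =====
-- Pre_ excludes exactly the inputs on which Python A raises IndexError (a delta list too short
-- for a needed lookup; with Python's short-circuit 'and', delta_x is only read when the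
-- delta_y test passed); A returns normally on every other input.
def Pre_row_deltay2par (row_content_lst : List String) (delta_y_lst : List Int) (delta_x_lst : List Int) : Prop :=
  ∀ i : Nat, i < row_content_lst.length → 1 ≤ i →
    (i - 1 < delta_y_lst.length ∧ (delta_y_lst.getD (i - 1) 0 < 14 → i < delta_x_lst.length))
instance (row_content_lst : List String) (delta_y_lst : List Int) (delta_x_lst : List Int) : Decidable (Pre_row_deltay2par row_content_lst delta_y_lst delta_x_lst) := by unfold Pre_row_deltay2par; infer_instance
def pvWitness_row_deltay2par : List String × List Int × List Int := (["ab", "cd", "ef"], [5, 20], [0, 3, 4])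

def Spec_row_deltay2par (row_content_lst : List String) (delta_y_lst : List Int) (delta_x_lst : List Int) (out : List String) : Prop := out = row_deltay2par_alt row_content_lst delta_y_lst delta_x_lst
instance (row_content_lst : List String) (delta_y_lst : List Int) (delta_x_lst : List Int) (out : List String) : Decidable (Spec_row_deltay2par row_content_lst delta_y_lst delta_x_lst out) := by unfold Spec_row_deltay2par; infer_instance

-- ===== CLAIM (what is proved, stated in full; the proofs are below) =====
def Claim_equal_row_deltay2par : Prop := ∀ (row_content_lst : List String) (delta_y_lst : List Int) (delta_x_lst : List Int), Dom_row_deltay2par row_content_lst delta_y_lst delta_x_lst → Pre_row_deltay2par row_content_lst delta_y_lst delta_x_lst → Spec_row_deltay2par row_content_lst delta_y_lst delta_x_lst (row_deltay2par row_content_lst delta_y_lst delta_x_lst)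

-- ===== LEMMAS AND PROOFS =====

-- the two ports' loop bodies, named (definitionally the ports' lambdas)
def pvF (rows : List String) (dy dx : List Int) : (List String × String) → Int → (List String × String) :=
  fun st i =>
    if i == 0 then
      (st.1, st.2 ++ PySem.List.pyGetD rows i "")
    else if PySem.List.pyGetD dy (i - 1) 0 < 14 ∧ PySem.List.pyGetD dx i 0 < 10 then
      (st.1, st.2 ++ PySem.List.pyGetD rows i "")
    else
      (st.1 ++ [st.2], PySem.List.pyGetD rows i "")

def pvG (dy dx : List Int) : List Int → Int → List Int :=
  fun bs i =>
    if ¬ (PySem.List.pyGetD dy (i - 1) 0 < 14 ∧ PySem.List.pyGetD dx i 0 < 10) then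
      bs ++ [i]
    else bs

theorem pvPortA_eq (rows : List String) (dy dx : List Int) :
    row_deltay2par rows dy dx =
      (let res := (PySem.List.pyRange 0 (rows.length : Int) 1).foldl (pvF rows dy dx) ([], "")
       res.1 ++ [res.2]) := rfl

theorem pvPortB_eq (rows : List String) (dy dx : List Int) :
    row_deltay2par_alt rows dy dx =
      (let bounds2 := (PySem.List.pyRange 1 (rows.length : Int) 1).foldl (pvG dy dx) [0] ++ [(rows.length : Int)]
       (bounds2.zip bounds2.tail).map
         (fun ab => PySem.Str.join "" (PySem.List.slice rows (some ab.1) (some ab.2)))) := rfl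

-- the break test on Nat indices (i >= 1): true iff row i starts a new paragraph
def pvBrk (dy dx : List Int) (i : Nat) : Bool :=
  ¬ (dy.getD (i - 1) 0 < 14 ∧ dx.getD i 0 < 10)

-- join with empty separator is concatenation
theorem pvCharsJoinNil (ps : List (List Char)) : PySem.Chars.join [] ps = ps.flatten := by
  induction ps with
  | nil => rfl
  | cons p rest ih =>
    cases rest with
    | nil => simp [PySem.Chars.join, List.intercalate]
    | cons q r => rw [PySem.Chars.join_cons_cons]; simp_all

theorem pvJoinNil : PySem.Str.join "" ([] : List String) = "" := by
  apply String.toList_injective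
  simp [PySem.Str.toList_join]

theorem pvJoinSnoc (xs : List String) (y : String) :
    PySem.Str.join "" (xs ++ [y]) = PySem.Str.join "" xs ++ y := by
  apply String.toList_injective
  simp [PySem.Str.toList_join, pvCharsJoinNil]

-- the join of one slice, Nat bounds
def pvSeg (rows : List String) (a b : Nat) : String :=
  PySem.Str.join "" ((rows.drop a).take (b - a))

theorem pvSeg_succ (rows : List String) (a n : Nat) (ha : a ≤ n) (hn : n < rows.length) :
    pvSeg rows a (n + 1) = pvSeg rows a n ++ rows.getD n "" := by
  unfold pvSeg
  have hlt : n - a < (rows.drop a).length := by simp; omega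
  have h2 : (rows.drop a).take ((n - a) + 1)
      = (rows.drop a).take (n - a) ++ [(rows.drop a)[n - a]] := by
    rw [List.take_succ, List.getElem?_eq_getElem hlt]
    simp
  have h3 : (rows.drop a)[n - a] = rows.getD n "" := by
    have hh : a + (n - a) = n := by omega
    rw [List.getElem_drop, List.getD_eq_getElem?_getD,
      List.getElem?_eq_getElem hn]
    simp only [Option.getD_some]
    simp only [hh]
  rw [show n + 1 - a = (n - a) + 1 by omega, h2, h3, pvJoinSnoc]

theorem pvSeg_single (rows : List String) (n : Nat) (hn : n < rows.length) :
    pvSeg rows n (n + 1) = rows.getD n "" := by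
  have h := pvSeg_succ rows n n (le_refl n) hn
  have h0 : pvSeg rows n n = "" := by
    unfold pvSeg
    rw [Nat.sub_self, List.take_zero, pvJoinNil]
  rw [h0] at h
  rw [h]
  simp

-- Nat-level boundary list after processing rows 0..n-1
def pvBounds (dy dx : List Int) (n : Nat) : List Nat :=
  0 :: (List.range' 1 (n - 1)).filter (pvBrk dy dx)

theorem pvBounds_ne_nil (dy dx : List Int) (n : Nat) : pvBounds dy dx n ≠ [] := by
  simp [pvBounds]

-- map consecutive pairs of a boundary list to joined slices
def pvSegs (rows : List String) (bs : List Nat) : List String :=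
  (bs.zip bs.tail).map (fun ab => pvSeg rows ab.1 ab.2)

theorem pvSegs_snoc (rows : List String) (b : Nat) (bs : List Nat) (e : Nat) :
    pvSegs rows ((b :: bs) ++ [e])
      = pvSegs rows (b :: bs) ++ [pvSeg rows ((b :: bs).getLast (by simp)) e] := by
  induction bs generalizing b with
  | nil => simp [pvSegs]
  | cons c cs ih =>
    have h := ih c
    simp only [pvSegs, List.cons_append, List.zip_cons_cons, List.tail_cons, List.map_cons] at h ⊢
    rw [h]
    simp

theorem pvBounds_last_le (dy dx : List Int) (n : Nat) :
    (pvBounds dy dx n).getLast (pvBounds_ne_nil dy dx n) ≤ n := by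
  have h : ∀ x ∈ pvBounds dy dx n, x ≤ n := by
    intro x hx
    simp only [pvBounds, List.mem_cons, List.mem_filter] at hx
    rcases hx with h | ⟨h, _⟩
    · omega
    · have := List.mem_range'.mp h; omega
  exact h _ (List.getLast_mem _)

-- pyRange 1 n over Int is range' 1 (n-1) over Nat, cast
theorem pvPyRangeOne (n : Nat) :
    PySem.List.pyRange 1 ((n : Int)) 1 = (List.range' 1 (n - 1)).map (fun (k : Nat) => (k : Int)) := by
  induction n with
  | zero => decide
  | succ m ih =>
    cases m with
    | zero => decide
    | succ k =>
      push_cast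
      rw [show ((k : Int) + 1 + 1) = ((k : Int) + 1) + 1 by ring,
        PySem.List.pyRange_one_succ_right (by omega)]
      simp at ih ⊢
      rw [ih, List.range'_concat]
      simp
      omega

theorem pvGetLastConcat (l : List Nat) (a : Nat) (h : l ++ [a] ≠ []) :
    (l ++ [a]).getLast h = a := List.getLast_concat

-- the main invariant: A's fold state after processing rows 0..n-1
theorem pvMain (rows : List String) (dy dx : List Int) :
    ∀ n, 1 ≤ n → n ≤ rows.length →
      ((List.range n).map (fun (k : Nat) => (k : Int))).foldl (pvF rows dy dx) ([], "")
        = (pvSegs rows (pvBounds dy dx n),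
           pvSeg rows ((pvBounds dy dx n).getLast (pvBounds_ne_nil dy dx n)) n) := by
  intro n
  induction n with
  | zero => omega
  | succ m ih =>
    intro _ hle
    cases Nat.eq_zero_or_pos m with
    | inl hm =>
      subst hm
      have hred : (List.range (0 + 1)).map (fun (k : Nat) => (k : Int)) = [(0 : Int)] := by decide
      rw [hred, List.foldl_cons, List.foldl_nil]
      have h0 : PySem.List.pyGetD rows (0 : Int) "" = rows.getD 0 "" := by
        have h := PySem.List.pyGetD_natCast rows 0 ""
        simpa using h
      have hseg : pvSeg rows 0 1 = rows.getD 0 "" := by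
        have h := pvSeg_single rows 0 (by omega)
        simpa using h
      simp [pvF, h0, pvBounds, pvSegs, hseg]
    | inr hm =>
      have hstep : (List.range (m + 1)).map (fun (k : Nat) => (k : Int))
          = (List.range m).map (fun (k : Nat) => (k : Int)) ++ [(m : Int)] := by
        rw [List.range_succ]; simp
      rw [hstep, List.foldl_append, List.foldl_cons, List.foldl_nil,
        ih hm (by omega)]
      have hm0 : ((m : Int) == 0) = false := by
        simp; omega
      have hcast : ((m : Int) - 1) = (((m - 1 : Nat)) : Int) := by
        push_cast [Nat.cast_sub hm]; ring
      have hcond : (PySem.List.pyGetD dy ((m : Int) - 1) 0 < 14 ∧ PySem.List.pyGetD dx ((m : Int)) 0 < 10)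
          ↔ (pvBrk dy dx m = false) := by
        rw [hcast, PySem.List.pyGetD_natCast, PySem.List.pyGetD_natCast]
        simp [pvBrk]
      have hbounds : pvBounds dy dx (m + 1)
          = pvBounds dy dx m ++ (if pvBrk dy dx m then [m] else []) := by
        unfold pvBounds
        rw [show m + 1 - 1 = (m - 1) + 1 by omega, List.range'_concat,
          List.filter_append]
        have : 1 + 1 * (m - 1) = m := by omega
        rw [this]
        cases h : pvBrk dy dx m <;> simp [h]
      unfold pvF
      rw [if_neg (by simp [hm0])]
      have hrow : PySem.List.pyGetD rows ((m : Int)) "" = rows.getD m "" :=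
        PySem.List.pyGetD_natCast rows m ""
      by_cases hbrk : pvBrk dy dx m
      · -- break: start a new paragraph at m
        rw [if_neg (by rw [hcond]; simp [hbrk])]
        simp only [hbounds, hbrk, if_true]
        obtain ⟨b, bs, hcons⟩ := List.exists_cons_of_ne_nil (pvBounds_ne_nil dy dx m)
        simp only [hcons]
        rw [pvSegs_snoc rows b bs m]
        simp only [Prod.mk.injEq]
        refine ⟨trivial, ?_⟩
        rw [pvGetLastConcat, hrow, pvSeg_single rows m (by omega)]
      · -- continue the current paragraph
        rw [if_pos (by rw [hcond]; simp [hbrk])]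
        simp only [hbounds, hbrk, Bool.false_eq_true, if_false, List.append_nil]
        simp only [Prod.mk.injEq]
        refine ⟨trivial, ?_⟩
        rw [hrow, pvSeg_succ rows _ m (pvBounds_last_le dy dx m) (by omega)]

-- B's output, re-expressed over the Nat-level boundary list
theorem pvAltEq (rows : List String) (dy dx : List Int) :
    row_deltay2par_alt rows dy dx = pvSegs rows (pvBounds dy dx rows.length ++ [rows.length]) := by
  rw [pvPortB_eq]
  simp only []
  have hfold : (PySem.List.pyRange 1 ((rows.length : Int)) 1).foldl (pvG dy dx) [0]
      = (pvBounds dy dx rows.length).map (fun (k : Nat) => (k : Int)) := by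
    rw [pvPyRangeOne, List.foldl_map]
    have hcongr : (List.range' 1 (rows.length - 1)).foldl
          (fun (bs : List Int) (k : Nat) => pvG dy dx bs ((k : Int))) [0]
        = (List.range' 1 (rows.length - 1)).foldl
          (fun (bs : List Int) (k : Nat) => if pvBrk dy dx k then bs ++ [(k : Int)] else bs) [0] := by
      apply PySem.List.foldl_congr_mem
      intro acc x hx
      have hx1 : 1 ≤ x := by
        have h := List.mem_range'.mp hx
        omega
      have hcast : ((x : Int) - 1) = (((x - 1 : Nat)) : Int) := by
        push_cast [Nat.cast_sub hx1]; ring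
      unfold pvG
      rw [hcast, PySem.List.pyGetD_natCast, PySem.List.pyGetD_natCast]
      simp only [pvBrk, List.getD_eq_getElem?_getD]
      by_cases hd : (dy[x - 1]?.getD 0 : Int) < 14
      · by_cases he : (dx[x]?.getD 0 : Int) < 10
        · rw [if_neg (by simp; omega), if_neg (by simp; omega)]
        · rw [if_pos (by simp; omega), if_pos (by simp; omega)]
      · rw [if_pos (by simp; omega), if_pos (by simp; omega)]
    rw [hcongr, PySem.List.foldl_append_if (pvBrk dy dx) (fun (k : Nat) => (k : Int))]
    simp [pvBounds]
  rw [hfold]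
  have hb2 : (pvBounds dy dx rows.length).map (fun (k : Nat) => (k : Int)) ++ [((rows.length : Nat) : Int)]
      = (pvBounds dy dx rows.length ++ [rows.length]).map (fun (k : Nat) => (k : Int)) := by
    simp
  rw [hb2]
  set bs := pvBounds dy dx rows.length ++ [rows.length] with hbs
  rw [← List.map_tail, List.zip_map, List.map_map]
  unfold pvSegs
  apply List.map_congr_left
  intro ab _
  simp [Function.comp, Prod.map, pvSeg, PySem.List.slice_natCast]

-- ===== VERDICT (by name: the statement is the Claim_ definition above) =====
theorem row_deltay2par_spec : Claim_equal_row_deltay2par := by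
  intro rows dy dx _ _
  unfold Spec_row_deltay2par
  rw [pvAltEq]
  cases Nat.eq_zero_or_pos rows.length with
  | inl h0 =>
    have hrows : rows = [] := List.eq_nil_of_length_eq_zero h0
    subst hrows
    rw [pvPortA_eq]
    simp only [List.length_nil, Nat.cast_zero]
    rw [show PySem.List.pyRange 0 (0 : Int) 1 = [] from by decide]
    simp [pvBounds, pvSegs, pvSeg, pvJoinNil]
  | inr hpos =>
    rw [pvPortA_eq]
    rw [show PySem.List.pyRange 0 ((rows.length : Nat) : Int) 1
        = (List.range rows.length).map (fun (k : Nat) => (k : Int)) from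
      PySem.List.pyRange_zero_natCast rows.length]
    rw [pvMain rows dy dx rows.length hpos (le_refl _)]
    obtain ⟨b, bs2, hcons⟩ := List.exists_cons_of_ne_nil (pvBounds_ne_nil dy dx rows.length)
    simp only [hcons]
    rw [pvSegs_snoc rows b bs2 rows.length]
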